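-- pv_equiv track=rewrite | github.com/LemonHaze420/misc_utils | lemonjuice/lemonjuice.py | extract_disassembly
-- ===== SOURCE A (Python) =====
-- def extract_disassembly(disasm_output: str, function_name: str) -> str:
--     function_labels = [f"{function_name}:", f"?{function_name}"]
--     found = False
--     extracted_lines = []
--     for line in disasm_output.splitlines():
--         line = line.rstrip()
--         if line.startswith(tuple( function_labels)):
--             found = True
--             extracted_lines.append(line)
--             continue
--         if found:
--             if line.startswith(" "):
--                 extracted_lines.append(line)
--             else:
--                 break
--     return "\n".join(extracted_lines)
-- ===== SOURCE B (Python) =====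
-- def extract_disassembly(disasm_output: str, function_name: str) -> str:
--     labels = (function_name + ":", "?" + function_name)
--
--     def is_label(line):
--         return line.startswith(labels)
--
--     def in_block(line):
--         return is_label(line) or line.startswith(" ")
--
--     # phase 1: skip lines until the first label line
--     tail = [line.rstrip() for line in disasm_output.splitlines()]
--     while tail and not is_label(tail[0]):
--         tail = tail[1:]
--     # phase 2: take the maximal run of label / indented lines
--     block = []
--     for line in tail:
--         if not in_block(line):
--             break
--         block.append(line)
--     return "\n".join(block)
-- ===== Notes on version B (the rewrite author's own statement) =====
-- stated objective: alternative
-- what changed: Replaces A's single fused scan with a mutable found flag by a two-phase skip-then-take decomposition: first drop lines until the first label line, then take the maximal run of label/indented lines.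
import Mathlib
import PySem

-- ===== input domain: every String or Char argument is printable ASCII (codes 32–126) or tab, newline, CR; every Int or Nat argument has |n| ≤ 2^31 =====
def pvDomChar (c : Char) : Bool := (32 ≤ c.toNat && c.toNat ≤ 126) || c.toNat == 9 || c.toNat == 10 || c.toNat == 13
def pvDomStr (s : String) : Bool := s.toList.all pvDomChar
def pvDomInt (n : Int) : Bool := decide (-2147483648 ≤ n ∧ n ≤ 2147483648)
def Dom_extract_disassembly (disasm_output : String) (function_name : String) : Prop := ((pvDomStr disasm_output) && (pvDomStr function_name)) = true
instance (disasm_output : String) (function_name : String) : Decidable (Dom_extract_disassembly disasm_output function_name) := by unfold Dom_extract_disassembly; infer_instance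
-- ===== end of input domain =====

-- B replaces A's fused scan with a found flag by a two-phase skip-then-take decomposition (alternative; same cost).

-- ===== PORT A =====
-- A's for-loop with `found` flag, `continue` and `break`, as structural recursion over the lines.
def pvLoopA (labels : List String) (found : Bool) (acc : List String) : List String → List String
  | [] => acc
  | l :: ls =>
    let line := PySem.Str.rstrip l
    if labels.any (fun p => PySem.Str.startswith line p) then
      pvLoopA labels true (acc ++ [line]) ls
    else if found then
      (if PySem.Str.startswith line " " then pvLoopA labels found (acc ++ [line]) ls else acc)
    else
      pvLoopA labels found acc ls

def extract_disassembly (disasm_output : String) (function_name : String) : String :=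
  let function_labels := [function_name ++ ":", "?" ++ function_name]
  PySem.Str.join "\n" (pvLoopA function_labels false [] (PySem.Str.splitlines disasm_output))

-- ===== PORT B =====
def pvIsLabel (labels : List String) (line : String) : Bool :=
  labels.any (fun p => PySem.Str.startswith line p)

def pvInBlock (labels : List String) (line : String) : Bool :=
  pvIsLabel labels line || PySem.Str.startswith line " "

-- Source B's `while tail and not is_label(tail[0]): tail = tail[1:]`
def pvSkip (labels : List String) : List String → List String
  | [] => []
  | l :: ls => if pvIsLabel labels l then l :: ls else pvSkip labels ls

-- Source B's second loop: append while in_block, break at the first failure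
def pvTake (labels : List String) : List String → List String
  | [] => []
  | l :: ls => if pvInBlock labels l then l :: pvTake labels ls else []

def extract_disassembly_alt (disasm_output : String) (function_name : String) : String :=
  let labels := [function_name ++ ":", "?" ++ function_name]
  let tail := pvSkip labels ((PySem.Str.splitlines disasm_output).map PySem.Str.rstrip)
  PySem.Str.join "\n" (pvTake labels tail)

-- ===== PRECONDITION & SPEC =====
def Spec_extract_disassembly (disasm_output : String) (function_name : String) (out : String) : Prop := out = extract_disassembly_alt disasm_output function_name
instance (disasm_output : String) (function_name : String) (out : String) : Decidable (Spec_extract_disassembly disasm_output function_name out) := by unfold Spec_extract_disassembly; infer_instance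

-- ===== CLAIM (what is proved, stated in full; the proofs are below) =====
def Claim_equal_extract_disassembly : Prop := ∀ (disasm_output : String) (function_name : String), Dom_extract_disassembly disasm_output function_name → Spec_extract_disassembly disasm_output function_name (extract_disassembly disasm_output function_name)

-- ===== LEMMAS AND PROOFS =====
-- After the first label line, A's loop appends exactly the maximal in-block run.
theorem pvLoopA_found (labels : List String) (ls : List String) (acc : List String) :
    pvLoopA labels true acc ls = acc ++ pvTake labels (ls.map PySem.Str.rstrip) := by
  induction ls generalizing acc with
  | nil => simp [pvLoopA, pvTake]
  | cons l ls ih =>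
    simp only [pvLoopA, List.map_cons, pvTake, pvInBlock, pvIsLabel]
    by_cases h : ∃ x ∈ labels, PySem.Chars.startswith (PySem.Chars.rstrip l.toList) x.toList = true
    · simp [h, ih]
    · by_cases hs : PySem.Chars.startswith (PySem.Chars.rstrip l.toList) [' '] = true
      · simp [h, hs, ih]
      · simp [h, hs]

-- Before the first label line, A's loop is B's skip phase followed by its take phase.
theorem pvLoopA_notfound (labels : List String) (ls : List String) :
    pvLoopA labels false [] ls = pvTake labels (pvSkip labels (ls.map PySem.Str.rstrip)) := by
  induction ls with
  | nil => simp [pvLoopA, pvSkip, pvTake]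
  | cons l ls ih =>
    simp only [pvLoopA, List.map_cons, pvSkip, pvIsLabel]
    by_cases h : ∃ x ∈ labels, PySem.Chars.startswith (PySem.Chars.rstrip l.toList) x.toList = true
    · simp [h, pvLoopA_found, pvTake, pvInBlock, pvIsLabel]
    · simp [h, ih]

-- ===== VERDICT (by name: the statement is the Claim_ definition above) =====
theorem extract_disassembly_spec : Claim_equal_extract_disassembly := by
  intro d f _
  unfold Spec_extract_disassembly extract_disassembly extract_disassembly_alt
  exact congrArg (PySem.Str.join "\n") (pvLoopA_notfound _ _)
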